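-- pv_equiv track=rewrite | github.com/dvlprsh/PS | Programmers/Lv3/숫자 게임.py | solution
-- ===== SOURCE A (Python) =====
-- def solution(A, B):
--     answer = 0
--     A.sort()
--     B.sort()
--     idx1 = 0
--     idx2 = 0
--     while idx1 < len(A) and idx2 < len(B):
--         if B[idx2] > A[idx1]:
--             answer += 1
--             idx1 += 1
--             idx2 += 1
--         else:
--             idx2 += 1
--     return answer
-- ===== SOURCE B (Python) =====
-- def solution(A, B):
--     A.sort()
--     B.sort()
--     n, m = len(A), len(B)
--     lo, hi = 0, min(n, m)
--     while lo < hi: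
--         mid = (lo + hi + 1) // 2
--         if all(B[m - mid + i] > A[i] for i in range(mid)):
--             lo = mid
--         else:
--             hi = mid - 1
--     return lo
-- ===== Notes on version B (the rewrite author's own statement) =====
-- stated objective: alternative
-- what changed: Replaces A's greedy two-pointer scan by a binary search on the answer k, each candidate k verified by checking that the k largest elements of sorted B beat the k smallest elements of sorted A pairwise; same in-place ascending sorts.
import Mathlib
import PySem

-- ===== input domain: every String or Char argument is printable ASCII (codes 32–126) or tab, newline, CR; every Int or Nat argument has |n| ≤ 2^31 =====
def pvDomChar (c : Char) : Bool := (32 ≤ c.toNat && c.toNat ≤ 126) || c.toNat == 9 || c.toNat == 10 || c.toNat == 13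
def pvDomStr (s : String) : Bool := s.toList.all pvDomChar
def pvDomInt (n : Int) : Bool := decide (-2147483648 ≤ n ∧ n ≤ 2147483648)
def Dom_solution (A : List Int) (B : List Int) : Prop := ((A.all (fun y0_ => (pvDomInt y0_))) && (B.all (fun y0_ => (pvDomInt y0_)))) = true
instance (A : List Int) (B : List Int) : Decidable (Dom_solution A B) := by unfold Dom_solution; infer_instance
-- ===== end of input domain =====

-- B replaces A's greedy two-pointer scan by a binary search on the answer k, each candidate
-- verified by pairing the k largest of sorted B against the k smallest of sorted A; both
-- programs sort the arguments in place identically, and the equivalence proved here is about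
-- the return value.

-- ===== PORT A =====
-- the while loop of A: idx2 increases every iteration
def solLoopA (A B : List Int) (idx1 idx2 : Nat) (answer : Int) : Int :=
  if h : idx1 < A.length ∧ idx2 < B.length then
    if B.getD idx2 0 > A.getD idx1 0 then
      solLoopA A B (idx1 + 1) (idx2 + 1) (answer + 1)
    else
      solLoopA A B idx1 (idx2 + 1) answer
  else answer
termination_by B.length - idx2
decreasing_by all_goals omega

def solution (A : List Int) (B : List Int) : Int :=
  let As := PySem.List.sorted A (fun x => x) false
  let Bs := PySem.List.sorted B (fun x => x) false
  solLoopA As Bs 0 0 0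

-- ===== PORT B =====
-- all(B[m - k + i] > A[i] for i in range(k))
def okCheck (A B : List Int) (k : Nat) : Bool :=
  (List.range k).all (fun i => B.getD (B.length - k + i) 0 > A.getD i 0)

-- the binary-search while loop of B: lo, hi with lo ≤ hi
def solBS (A B : List Int) (lo hi : Nat) : Nat :=
  if h : lo < hi then
    -- mid = (lo + hi + 1) // 2
    if okCheck A B ((lo + hi + 1) / 2) then solBS A B ((lo + hi + 1) / 2) hi
    else solBS A B lo ((lo + hi + 1) / 2 - 1)
  else lo
termination_by hi - lo
decreasing_by all_goals omega

def solution_alt (A : List Int) (B : List Int) : Int :=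
  let As := PySem.List.sorted A (fun x => x) false
  let Bs := PySem.List.sorted B (fun x => x) false
  (solBS As Bs 0 (min As.length Bs.length) : Int)

-- ===== PRECONDITION & SPEC =====
def Spec_solution (A : List Int) (B : List Int) (out : Int) : Prop := out = solution_alt A B
instance (A : List Int) (B : List Int) (out : Int) : Decidable (Spec_solution A B out) := by unfold Spec_solution; infer_instance

-- ===== CLAIM (what is proved, stated in full; the proofs are below) =====
def Claim_equal_solution : Prop := ∀ (A : List Int) (B : List Int), Dom_solution A B → Spec_solution A B (solution A B)

-- ===== LEMMAS AND PROOFS =====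

-- low-end greedy on ascending lists (what loop A computes on the suffixes)
def fGreedy : List Int → List Int → Int
  | _, [] => 0
  | [], _ => 0
  | a :: As, b :: Bs => if a < b then 1 + fGreedy As Bs else fGreedy (a :: As) Bs

-- the feasibility predicate behind okCheck
def Ok (A B : List Int) (k : Nat) : Prop :=
  ∀ i < k, A.getD i 0 < B.getD (B.length - k + i) 0

lemma okCheck_iff (A B : List Int) (k : Nat) : okCheck A B k = true ↔ Ok A B k := by
  unfold okCheck Ok
  simp [List.all_eq_true, List.mem_range]

lemma fGreedy_nil_right (A : List Int) : fGreedy A [] = 0 := by cases A <;> simp [fGreedy]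
lemma fGreedy_nil_left (B : List Int) : fGreedy [] B = 0 := by cases B <;> simp [fGreedy]

lemma loopA_eq (A B : List Int) (idx1 idx2 : Nat) (ans : Int) :
    solLoopA A B idx1 idx2 ans = ans + fGreedy (A.drop idx1) (B.drop idx2) := by
  induction idx1, idx2, ans using solLoopA.induct (A := A) (B := B) with
  | case1 idx1 idx2 ans h hgt ih =>
    rw [solLoopA, dif_pos h, if_pos hgt, ih,
      List.drop_eq_getElem_cons h.1, List.drop_eq_getElem_cons h.2]
    rw [List.getD_eq_getElem _ _ h.1, List.getD_eq_getElem _ _ h.2] at hgt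
    simp only [fGreedy, if_pos hgt]
    omega
  | case2 idx1 idx2 ans h hgt ih =>
    rw [solLoopA, dif_pos h, if_neg hgt, ih]
    rw [List.getD_eq_getElem _ _ h.1, List.getD_eq_getElem _ _ h.2] at hgt
    conv_rhs => rw [List.drop_eq_getElem_cons h.1, List.drop_eq_getElem_cons h.2]
    conv_lhs => rw [List.drop_eq_getElem_cons h.1]
    simp only [fGreedy, if_neg hgt]
  | case3 idx1 idx2 ans h =>
    rw [solLoopA, dif_neg h]
    rcases Nat.lt_or_ge idx1 A.length with h1 | h1
    · have h2 : B.length ≤ idx2 := by omega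
      rw [List.drop_eq_nil_of_le h2, fGreedy_nil_right]; omega
    · rw [List.drop_eq_nil_of_le h1, fGreedy_nil_left]; omega

-- the greedy count, as a Nat (fGreedy is that Nat)
def fN : List Int → List Int → Nat
  | _, [] => 0
  | [], _ => 0
  | a :: As, b :: Bs => if a < b then 1 + fN As Bs else fN (a :: As) Bs

lemma fGreedy_eq_fN (A B : List Int) : fGreedy A B = (fN A B : Int) := by
  induction A, B using fN.induct with
  | case1 A => rw [fGreedy_nil_right]; cases A <;> simp [fN]
  | case2 B => rw [fGreedy_nil_left]; cases B <;> simp [fN]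
  | case3 a As b Bs hab ih => simp [fGreedy, fN, hab, ih]
  | case4 a As b Bs hab ih => simp [fGreedy, fN, hab, ih]

lemma fN_le (A B : List Int) : fN A B ≤ A.length ∧ fN A B ≤ B.length := by
  induction A, B using fN.induct with
  | case1 A => simp [fN]
  | case2 B => simp [fN]
  | case3 a As b Bs hab ih => simp only [fN, if_pos hab, List.length_cons]; omega
  | case4 a As b Bs hab ih =>
    simp only [List.length_cons] at ih
    simp only [fN, if_neg hab, List.length_cons]
    omega

-- sorted lists: getD is monotone in the index
lemma sorted_getD_mono (B : List Int) (hB : B.Pairwise (· ≤ ·)) (i j : Nat)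
    (hij : i ≤ j) (hj : j < B.length) : B.getD i 0 ≤ B.getD j 0 := by
  rw [List.getD_eq_getElem _ _ (by omega), List.getD_eq_getElem _ _ hj]
  rcases Nat.lt_or_ge i j with h | h
  · exact (List.pairwise_iff_getElem.mp hB) i j (by omega) hj h
  · have : i = j := by omega
    subst this; exact le_refl _

-- (achievability) the greedy count is feasible
lemma ok_fN (A B : List Int) (hB : B.Pairwise (· ≤ ·)) : Ok A B (fN A B) := by
  induction A, B using fN.induct with
  | case1 A => intro i hi; simp [fN] at hi
  | case2 B => intro i hi; simp [fN] at hi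
  | case3 a As b Bs hab ih =>
    have hB' : Bs.Pairwise (· ≤ ·) := (List.pairwise_cons.mp hB).2
    have hbB : ∀ y ∈ Bs, b ≤ y := (List.pairwise_cons.mp hB).1
    have hle := fN_le As Bs
    have hIH := ih hB'
    have hgoal : fN (a :: As) (b :: Bs) = 1 + fN As Bs := by simp [fN, hab]
    set f := fN As Bs with hf
    intro i hi
    rw [hgoal] at hi ⊢
    rcases Nat.eq_zero_or_pos i with h0 | h0
    · subst h0
      have hidx : (b :: Bs).length - (1 + f) + 0 = Bs.length - f := by
        simp only [List.length_cons]; omega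
      rw [hidx]
      have h1 : (a :: As).getD 0 0 = a := by simp
      rw [h1]
      have hble : b ≤ (b :: Bs).getD (Bs.length - f) 0 := by
        rcases Nat.eq_zero_or_pos (Bs.length - f) with hz | hz
        · rw [hz]; simp
        · have e : Bs.length - f = (Bs.length - f - 1) + 1 := by omega
          rw [e]
          have e2 : (b :: Bs).getD (Bs.length - f - 1 + 1) 0
              = Bs.getD (Bs.length - f - 1) 0 := by simp
          rw [e2, List.getD_eq_getElem _ _ (by omega)]
          exact hbB _ (List.getElem_mem _)
      omega
    · have hi' : i - 1 < f := by omega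
      have hlt := hIH (i - 1) hi'
      have e1 : (a :: As).getD i 0 = As.getD (i - 1) 0 := by
        rw [show i = (i - 1) + 1 by omega]; simp
      have e2 : (b :: Bs).length - (1 + f) + i = (Bs.length - f + (i - 1)) + 1 := by
        simp only [List.length_cons]; omega
      rw [e1, e2]
      simpa using hlt
  | case4 a As b Bs hab ih =>
    have hB' : Bs.Pairwise (· ≤ ·) := (List.pairwise_cons.mp hB).2
    have hIH := ih hB'
    have hle := fN_le (a :: As) Bs
    have hgoal : fN (a :: As) (b :: Bs) = fN (a :: As) Bs := by simp [fN, hab]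
    intro i hi
    rw [hgoal] at hi ⊢
    have hlt := hIH i hi
    have e : (b :: Bs).length - fN (a :: As) Bs + i
        = (Bs.length - fN (a :: As) Bs + i) + 1 := by
      simp only [List.length_cons]; omega
    rw [e]
    simpa using hlt

-- (optimality) any feasible k is at most the greedy count
lemma ok_le_fN (A B : List Int) (k : Nat) (hkA : k ≤ A.length) (hkB : k ≤ B.length)
    (hok : Ok A B k) : k ≤ fN A B := by
  induction A, B using fN.induct generalizing k with
  | case1 A =>
    have : k = 0 := by simpa using hkB
    exact this ▸ Nat.zero_le _
  | case2 B =>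
    have : k = 0 := by simpa using hkA
    exact this ▸ Nat.zero_le _
  | case3 a As b Bs hab ih =>
    simp only [fN, if_pos hab]
    rcases Nat.eq_zero_or_pos k with h0 | h0
    · omega
    · have hok' : Ok As Bs (k - 1) := by
        intro i hi
        have h1 := hok (i + 1) (by omega)
        have e1 : (a :: As).getD (i + 1) 0 = As.getD i 0 := by simp
        have e2 : (b :: Bs).length - k + (i + 1) = (Bs.length - (k - 1) + i) + 1 := by
          simp only [List.length_cons]; omega
        rw [e1, e2] at h1
        simpa using h1
      have := ih (k - 1) (by simp at hkA; omega) (by simp at hkB; omega) hok'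
      omega
  | case4 a As b Bs hab ih =>
    simp only [fN, if_neg hab]
    rcases Nat.eq_zero_or_pos k with h0 | h0
    · omega
    · by_cases hkm : k = (b :: Bs).length
      · exfalso
        have h1 := hok 0 h0
        have e : (b :: Bs).length - k + 0 = 0 := by omega
        rw [e] at h1
        simp at h1
        omega
      · have hkB' : k ≤ Bs.length := by simp at hkB hkm ⊢; omega
        refine ih k hkA hkB' ?_
        intro i hi
        have h1 := hok i hi
        have e : (b :: Bs).length - k + i = (Bs.length - k + i) + 1 := by
          simp only [List.length_cons]; omega
        rw [e] at h1
        simpa using h1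

-- (monotonicity) feasibility is downward closed on sorted B
lemma ok_mono (A B : List Int) (hB : B.Pairwise (· ≤ ·)) (j k : Nat)
    (hjk : j ≤ k) (hkm : k ≤ B.length) (hok : Ok A B k) : Ok A B j := by
  intro i hi
  have h1 := hok i (by omega)
  have h2 : B.getD (B.length - k + i) 0 ≤ B.getD (B.length - j + i) 0 := by
    apply sorted_getD_mono B hB _ _ (by omega) (by omega)
  omega

-- binary-search correctness against a threshold f
lemma solBS_eq (A B : List Int) (f : Nat)
    (hchar : ∀ k, k ≤ min A.length B.length → (okCheck A B k = true ↔ k ≤ f)) :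
    ∀ lo hi, lo ≤ f → f ≤ hi → hi ≤ min A.length B.length → solBS A B lo hi = f := by
  intro lo hi
  induction lo, hi using solBS.induct (A := A) (B := B) with
  | case1 lo hi h hok ih =>
    intro hlo hhi hm
    have hmid : lo < (lo + hi + 1) / 2 ∧ (lo + hi + 1) / 2 ≤ hi := by omega
    rw [solBS, dif_pos h, if_pos hok]
    have : (lo + hi + 1) / 2 ≤ f := (hchar _ (by omega)).mp hok
    exact ih this hhi hm
  | case2 lo hi h hok ih =>
    intro hlo hhi hm
    have hmid : lo < (lo + hi + 1) / 2 ∧ (lo + hi + 1) / 2 ≤ hi := by omega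
    rw [solBS, dif_pos h, if_neg hok]
    have hfm : ¬ (lo + hi + 1) / 2 ≤ f := fun hle => hok ((hchar _ (by omega)).mpr hle)
    exact ih hlo (by omega) (by omega)
  | case3 lo hi h =>
    intro hlo hhi hm
    rw [solBS, dif_neg h]
    omega

-- ===== VERDICT (by name: the statement is the Claim_ definition above) =====
theorem solution_spec : Claim_equal_solution := by
  intro A B _
  unfold Spec_solution solution solution_alt
  set As := PySem.List.sorted A (fun x => x) false with hAs
  set Bs := PySem.List.sorted B (fun x => x) false with hBs
  show solLoopA As Bs 0 0 0 = ((solBS As Bs 0 (min As.length Bs.length) : Nat) : Int)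
  have hBpw : Bs.Pairwise (· ≤ ·) := by
    have := PySem.List.sorted_pairwise (xs := B) (key := fun x => x)
    simpa using this
  set f := fN As Bs with hf
  have hfle := fN_le As Bs
  have hchar : ∀ k, k ≤ min As.length Bs.length → (okCheck As Bs k = true ↔ k ≤ f) := by
    intro k hk
    rw [okCheck_iff]
    constructor
    · intro hok; exact ok_le_fN As Bs k (by omega) (by omega) hok
    · intro hle
      exact ok_mono As Bs hBpw k f hle (by omega) (ok_fN As Bs hBpw)
  rw [solBS_eq As Bs f hchar 0 (min As.length Bs.length) (by omega) (by omega) (le_refl _)]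
  rw [loopA_eq]
  simp only [List.drop_zero, Int.zero_add]
  exact fGreedy_eq_fN As Bs
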